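-- pv_equiv track=rewrite | github.com/Reverier-Xu/ISAE | DataFlowPanel/Modules/BaseModuleUtils.py | base64_ste
-- ===== SOURCE A (Python) =====
-- def base64_ste(lines):
--     alphabet = 'ABCDEFGHIJKLMNOPQRSTUVWXYZabcdefghijklmnopqrstuvwxyz0123456789+/'
--     flag = ''
--     temp = 0
--     digit = 0
--     for i in lines:
--         if i[-1] != '=':
--             continue
--         elif i[-2] != '=':
--             digit += 2
--             temp = (temp << 2) + (alphabet.find(i[-2]) & 0x3)
--         else:
--             digit += 4
--             temp = (temp << 4) + (alphabet.find(i[-3]) & 0xf)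
--         if digit == 8:
--             digit = 0
--             flag += chr(temp)
--             temp = 0
--         elif digit > 8:
--             digit = 2
--             flag += chr(temp >> 2)
--             temp = temp & 0x3
--     return flag
-- ===== SOURCE B (Python) =====
-- def base64_ste(lines):
--     alphabet = 'ABCDEFGHIJKLMNOPQRSTUVWXYZabcdefghijklmnopqrstuvwxyz0123456789+/'
--     # Pass 1: pack every contributed padding bit (MSB-first) into one big integer.
--     acc = 0
--     n = 0
--     for i in lines:
--         if i[-1] != '=':
--             continue
--         if i[-2] != '=':
--             acc = acc * 4 + (alphabet.find(i[-2]) & 0x3)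
--             n += 2
--         else:
--             acc = acc * 16 + (alphabet.find(i[-3]) & 0xf)
--             n += 4
--     # Pass 2: drop the incomplete trailing group, then peel off bytes back-to-front.
--     acc //= 2 ** (n % 8)
--     out = ''
--     for _ in range(n // 8):
--         out = chr(acc % 256) + out
--         acc //= 256
--     return out
-- ===== Notes on version B (the rewrite author's own statement) =====
-- stated objective: alternative
-- what changed: A decodes with an inline running accumulator that flushes a byte whenever its bit counter reaches or exceeds 8 (with a carry case); B first packs all contributed padding bits MSB-first into one big integer in a single pass, then drops the incomplete trailing group and peels complete bytes off the integer back-to-front in a second pass.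
import Mathlib
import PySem

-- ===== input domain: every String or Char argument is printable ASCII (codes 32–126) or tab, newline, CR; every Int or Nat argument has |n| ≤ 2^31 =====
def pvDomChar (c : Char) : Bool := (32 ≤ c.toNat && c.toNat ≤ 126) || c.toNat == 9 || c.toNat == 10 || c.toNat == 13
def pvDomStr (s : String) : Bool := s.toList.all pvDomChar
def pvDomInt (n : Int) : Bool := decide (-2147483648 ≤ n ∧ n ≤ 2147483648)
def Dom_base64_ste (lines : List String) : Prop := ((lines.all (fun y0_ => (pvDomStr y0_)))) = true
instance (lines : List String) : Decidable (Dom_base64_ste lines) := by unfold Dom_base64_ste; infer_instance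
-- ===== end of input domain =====

-- B replaces A's running flush-on-8-bits accumulator by: pass 1 packs all padding bits into one big
-- integer, pass 2 peels whole bytes off it back-to-front (same value, alternative decomposition).

-- ===== PORT A =====
def b64Alphabet : String :=
  "ABCDEFGHIJKLMNOPQRSTUVWXYZabcdefghijklmnopqrstuvwxyz0123456789+/"

-- alphabet.find(c)
def b64find (c : Char) : Int := PySem.Str.find b64Alphabet (String.mk [c])

-- the tail of A's loop body: `if digit == 8: … elif digit > 8: …`
-- (flag kept as List Char; chr = Char.ofNat, exact since 0 ≤ temp < 256 whenever this is reached)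
def aUpd (flag : List Char) (temp' digit' : Int) : List Char × Int × Int :=
  if digit' = 8 then (flag ++ [Char.ofNat temp'.toNat], 0, 0)
  else if digit' > 8 then (flag ++ [Char.ofNat (temp' >>> (2 : Nat)).toNat], PySem.Int.band temp' 0x3, 2)
  else (flag, temp', digit')

-- one iteration of A's `for i in lines`; state (flag, temp, digit); none = IndexError
def aLine (st : List Char × Int × Int) (i : String) : Option (List Char × Int × Int) :=
  match PySem.Str.pyGet? i (-1) with
  | none => none
  | some c1 =>
    if c1 ≠ '=' then some st
    else
      match PySem.Str.pyGet? i (-2) with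
      | none => none
      | some c2 =>
        if c2 ≠ '=' then
          some (aUpd st.1 ((st.2.1 <<< (2 : Nat)) + PySem.Int.band (b64find c2) 0x3) (st.2.2 + 2))
        else
          match PySem.Str.pyGet? i (-3) with
          | none => none
          | some c3 =>
            some (aUpd st.1 ((st.2.1 <<< (4 : Nat)) + PySem.Int.band (b64find c3) 0xf) (st.2.2 + 4))

def base64_ste (lines : List String) : String :=
  match lines.foldl (fun o i => o.bind (fun s => aLine s i)) (some ([], 0, 0)) with
  | some (flag, _, _) => String.mk flag
  | none => ""          -- unreachable under Pre_: Python raises IndexError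

-- ===== PORT B =====
-- one iteration of B's packing loop; state (acc, n); none = IndexError
def bLine (st : Int × Int) (i : String) : Option (Int × Int) :=
  match PySem.Str.pyGet? i (-1) with
  | none => none
  | some c1 =>
    if c1 ≠ '=' then some st
    else
      match PySem.Str.pyGet? i (-2) with
      | none => none
      | some c2 =>
        if c2 ≠ '=' then some (st.1 * 4 + PySem.Int.band (b64find c2) 0x3, st.2 + 2)
        else
          match PySem.Str.pyGet? i (-3) with
          | none => none
          | some c3 => some (st.1 * 16 + PySem.Int.band (b64find c3) 0xf, st.2 + 4)

def base64_ste_alt (lines : List String) : String :=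
  match lines.foldl (fun o i => o.bind (fun s => bLine s i)) (some (0, 0)) with
  | none => "IndexError"   -- unreachable under Pre_: Python raises IndexError
  | some (acc, n) =>
    -- acc //= 2 ** (n % 8)   (the loop keeps n ≥ 0, so the .toNat exponent is Python's 2**(n%8))
    let acc1 := PySem.Int.floordiv acc (2 ^ (PySem.Int.mod n 8).toNat)
    -- for _ in range(n // 8): out = chr(acc % 256) + out; acc //= 256
    let r := (PySem.List.pyRange 0 (PySem.Int.floordiv n 8) 1).foldl
      (fun (p : List Char × Int) _ =>
        (Char.ofNat (PySem.Int.mod p.2 256).toNat :: p.1, PySem.Int.floordiv p.2 256))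
      ([], acc1)
    String.mk r.1

-- ===== PRECONDITION & SPEC =====
-- Pre_ excludes exactly the inputs on which Python A raises IndexError: a line is indexed at [-1],
-- at [-2] when it ends in '=', and at [-3] when it ends in '=='; too-short lines raise.
def Pre_base64_ste (lines : List String) : Prop :=
  ∀ i ∈ lines,
    (PySem.Str.pyGet? i (-1)).isSome = true ∧
    (PySem.Str.pyGet? i (-1) = some '=' →
      (PySem.Str.pyGet? i (-2)).isSome = true ∧
      (PySem.Str.pyGet? i (-2) = some '=' → (PySem.Str.pyGet? i (-3)).isSome = true))
instance (lines : List String) : Decidable (Pre_base64_ste lines) := by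
  unfold Pre_base64_ste; infer_instance

def pvWitness_base64_ste : List String := ["TQ==", "abcd", "YQ=="]

def Spec_base64_ste (lines : List String) (out : String) : Prop := out = base64_ste_alt lines
instance (lines : List String) (out : String) : Decidable (Spec_base64_ste lines out) := by
  unfold Spec_base64_ste; infer_instance

-- ===== CLAIM (what is proved, stated in full; the proofs are below) =====
def Claim_equal_base64_ste : Prop :=
  ∀ (lines : List String), Dom_base64_ste lines → Pre_base64_ste lines →
    Spec_base64_ste lines (base64_ste lines)

-- ===== LEMMAS AND PROOFS =====

-- Python's `x & 3` / `x & 15` are x mod 4 / mod 16 (for every int, incl. -1 from a failed find)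
lemma pv_band3 (x : Int) : PySem.Int.band x 3 = x % 4 := by
  simp only [PySem.Int.band]
  norm_num
  rw [show (3:Int).toNat = 3 from rfl]
  split
  · have h := Nat.and_two_pow_sub_one_eq_mod x.toNat 2
    norm_num at h; omega
  · have h := Nat.and_two_pow_sub_one_eq_mod (-x - 1).toNat 2
    norm_num at h
    rw [Nat.and_comm]
    omega

lemma pv_band15 (x : Int) : PySem.Int.band x 15 = x % 16 := by
  simp only [PySem.Int.band]
  norm_num
  rw [show (15:Int).toNat = 15 from rfl]
  split
  · have h := Nat.and_two_pow_sub_one_eq_mod x.toNat 4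
    norm_num at h; omega
  · have h := Nat.and_two_pow_sub_one_eq_mod (-x - 1).toNat 4
    norm_num at h
    rw [Nat.and_comm]
    omega

lemma pv_shl2 (x : Int) : x <<< (2 : Nat) = x * 4 := by
  rw [← Int.shiftLeft_natCast_right, Int.shiftLeft_eq_mul_pow]; norm_num

lemma pv_shl4 (x : Int) : x <<< (4 : Nat) = x * 16 := by
  rw [← Int.shiftLeft_natCast_right, Int.shiftLeft_eq_mul_pow]; norm_num

lemma pv_shr2 (x : Int) (h : 0 ≤ x) : x >>> (2 : Nat) = x / 4 := by
  obtain ⟨m, rfl⟩ := Int.eq_ofNat_of_zero_le h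
  rw [← Int.shiftRight_natCast_right, Int.shiftRight_natCast, Nat.shiftRight_eq_div_pow]
  norm_num

lemma pv_some_bind {α β : Type} (a : α) (f : α → Option β) : (some a).bind f = f a := rfl

-- a failed (raising) loop stays failed
lemma pv_foldl_bind_none {σ : Type} (f : σ → String → Option σ) (lines : List String) :
    lines.foldl (fun o i => o.bind (fun s => f s i)) none = none := by
  induction lines with
  | nil => rfl
  | cons i ls ih => simpa using ih

-- MSB-first byte extraction: proof-side normal form of B's second loop
def pvExt (acc : Int) : Nat → List Char
  | 0 => []
  | m + 1 => pvExt (acc / 256) m ++ [Char.ofNat (acc % 256).toNat]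

lemma pv_foldl_ext (l : List Int) (out : List Char) (x : Int) :
    l.foldl
      (fun (p : List Char × Int) _ =>
        (Char.ofNat (PySem.Int.mod p.2 256).toNat :: p.1, PySem.Int.floordiv p.2 256))
      (out, x)
    = (pvExt x l.length ++ out, x / 256 ^ l.length) := by
  induction l generalizing out x with
  | nil => simp [pvExt]
  | cons a l ih =>
    simp only [List.foldl, List.length_cons]
    rw [PySem.Int.mod_eq_emod_of_pos (by norm_num),
      PySem.Int.floordiv_eq_ediv_of_pos (by norm_num), ih]
    simp only [Prod.mk.injEq]
    refine ⟨by simp [pvExt], ?_⟩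
    rw [Int.ediv_ediv_of_nonneg (by norm_num : (0:Int) ≤ 256),
      show (256:Int) * 256 ^ l.length = 256 ^ (l.length + 1) by rw [pow_succ]; ring]

-- the state correspondence: A's (flag, temp, digit) as a function of B's (acc, n)
def pvEnc (pre : List Char) (p : Int × Int) : List Char × Int × Int :=
  (pre ++ pvExt (p.1 / 2 ^ (p.2 % 8).toNat) (p.2 / 8).toNat, p.1 % 2 ^ (p.2 % 8).toNat, p.2 % 8)

-- absorbing 2 bits preserves the correspondence
lemma pv_step2 (pre : List Char) (acc n v : Int) (hn : 0 ≤ n)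
    (hpar : n % 2 = 0) (hv : 0 ≤ v) (hv4 : v < 4) :
    aUpd (pvEnc pre (acc, n)).1 ((pvEnc pre (acc, n)).2.1 * 4 + v) ((pvEnc pre (acc, n)).2.2 + 2)
      = pvEnc pre (acc * 4 + v, n + 2) := by
  have hd : n % 8 = 0 ∨ n % 8 = 2 ∨ n % 8 = 4 ∨ n % 8 = 6 := by omega
  unfold pvEnc aUpd
  rcases hd with hd | hd | hd | hd
  · rw [show (((n:Int)+2) % 8).toNat = 2 by omega, show (((n:Int)+2) / 8).toNat = (n / 8).toNat by omega,
      show ((n:Int) % 8).toNat = 0 by omega, show ((n:Int)+2) % 8 = 2 by omega, hd]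
    norm_num
    refine ⟨?_, by omega⟩
    rw [show (acc * 4 + v) / 4 = acc by omega]
  · rw [show (((n:Int)+2) % 8).toNat = 4 by omega, show (((n:Int)+2) / 8).toNat = (n / 8).toNat by omega,
      show ((n:Int) % 8).toNat = 2 by omega, show ((n:Int)+2) % 8 = 4 by omega, hd]
    norm_num
    refine ⟨by rw [show (acc * 4 + v) / 16 = acc / 4 by omega], by omega⟩
  · rw [show (((n:Int)+2) % 8).toNat = 6 by omega, show (((n:Int)+2) / 8).toNat = (n / 8).toNat by omega,
      show ((n:Int) % 8).toNat = 4 by omega, show ((n:Int)+2) % 8 = 6 by omega, hd]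
    norm_num
    refine ⟨by rw [show (acc * 4 + v) / 64 = acc / 16 by omega], by omega⟩
  · rw [show (((n:Int)+2) % 8).toNat = 0 by omega, show (((n:Int)+2) / 8).toNat = (n / 8).toNat + 1 by omega,
      show ((n:Int) % 8).toNat = 6 by omega, show ((n:Int)+2) % 8 = 0 by omega, hd]
    norm_num [pvExt]
    refine ⟨by rw [show (acc * 4 + v) / 256 = acc / 64 by omega],
      by rw [show (acc * 4 + v) % 256 = acc % 64 * 4 + v by omega]⟩

-- absorbing 4 bits preserves the correspondence (including the carry case digit = 10)
lemma pv_step4 (pre : List Char) (acc n v : Int) (hn : 0 ≤ n)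
    (hpar : n % 2 = 0) (hv : 0 ≤ v) (hv16 : v < 16) :
    aUpd (pvEnc pre (acc, n)).1 ((pvEnc pre (acc, n)).2.1 * 16 + v) ((pvEnc pre (acc, n)).2.2 + 4)
      = pvEnc pre (acc * 16 + v, n + 4) := by
  have hd : n % 8 = 0 ∨ n % 8 = 2 ∨ n % 8 = 4 ∨ n % 8 = 6 := by omega
  unfold pvEnc aUpd
  rcases hd with hd | hd | hd | hd
  · rw [show (((n:Int)+4) % 8).toNat = 4 by omega, show (((n:Int)+4) / 8).toNat = (n / 8).toNat by omega,
      show ((n:Int) % 8).toNat = 0 by omega, show ((n:Int)+4) % 8 = 4 by omega, hd]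
    norm_num
    refine ⟨?_, by omega⟩
    rw [show (acc * 16 + v) / 16 = acc by omega]
  · rw [show (((n:Int)+4) % 8).toNat = 6 by omega, show (((n:Int)+4) / 8).toNat = (n / 8).toNat by omega,
      show ((n:Int) % 8).toNat = 2 by omega, show ((n:Int)+4) % 8 = 6 by omega, hd]
    norm_num
    refine ⟨by rw [show (acc * 16 + v) / 64 = acc / 4 by omega], by omega⟩
  · rw [show (((n:Int)+4) % 8).toNat = 0 by omega, show (((n:Int)+4) / 8).toNat = (n / 8).toNat + 1 by omega,
      show ((n:Int) % 8).toNat = 4 by omega, show ((n:Int)+4) % 8 = 0 by omega, hd]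
    norm_num [pvExt]
    refine ⟨by rw [show (acc * 16 + v) / 256 = acc / 16 by omega],
      by rw [show (acc * 16 + v) % 256 = acc % 16 * 16 + v by omega]⟩
  · rw [show (((n:Int)+4) % 8).toNat = 2 by omega, show (((n:Int)+4) / 8).toNat = (n / 8).toNat + 1 by omega,
      show ((n:Int) % 8).toNat = 6 by omega, show ((n:Int)+4) % 8 = 2 by omega, hd]
    have hnn : (0:Int) ≤ acc % 64 * 16 + v := by
      have := Int.emod_nonneg acc (show (64:Int) ≠ 0 by norm_num); omega
    norm_num [pvExt]
    rw [pv_shr2 _ hnn, pv_band3]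
    refine ⟨⟨?_, ?_⟩, by omega⟩
    · rw [show (acc * 16 + v) / 4 / 256 = acc / 64 by omega]
    · rw [show (acc % 64 * 16 + v) / 4 = ((acc * 16 + v) / 4) % 256 by omega]

-- the two loops run in lock-step through the correspondence pvEnc
lemma pv_main (lines : List String) (pre : List Char) :
    ∀ (acc n : Int), 0 ≤ acc → 0 ≤ n → n % 2 = 0 →
    lines.foldl (fun o i => o.bind (fun s => aLine s i)) (some (pvEnc pre (acc, n)))
      = (lines.foldl (fun o i => o.bind (fun s => bLine s i)) (some (acc, n))).map (pvEnc pre) := by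
  induction lines with
  | nil => intro acc n _ _ _; rfl
  | cons i ls ih =>
    intro acc n hacc hn hpar
    simp only [List.foldl, pv_some_bind]
    cases hc1 : PySem.List.pyGet? i.toList (-1) with
    | none =>
      have hA1 : aLine (pvEnc pre (acc, n)) i = none := by simp [aLine, hc1]
      have hB1 : bLine (acc, n) i = none := by simp [bLine, hc1]
      rw [hA1, hB1, pv_foldl_bind_none, pv_foldl_bind_none, Option.map_none]
    | some c1 =>
      by_cases he1 : c1 = '='
      · subst he1
        cases hc2 : PySem.List.pyGet? i.toList (-2) with
        | none =>
          have hA1 : aLine (pvEnc pre (acc, n)) i = none := by simp [aLine, hc1, hc2]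
          have hB1 : bLine (acc, n) i = none := by simp [bLine, hc1, hc2]
          rw [hA1, hB1, pv_foldl_bind_none, pv_foldl_bind_none, Option.map_none]
        | some c2 =>
          by_cases he2 : c2 = '='
          · subst he2
            cases hc3 : PySem.List.pyGet? i.toList (-3) with
            | none =>
              have hA1 : aLine (pvEnc pre (acc, n)) i = none := by simp [aLine, hc1, hc2, hc3]
              have hB1 : bLine (acc, n) i = none := by simp [bLine, hc1, hc2, hc3]
              rw [hA1, hB1, pv_foldl_bind_none, pv_foldl_bind_none, Option.map_none]
            | some c3 =>
              have hv0 : 0 ≤ b64find c3 % 16 := Int.emod_nonneg _ (by norm_num)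
              have hv16 : b64find c3 % 16 < 16 := Int.emod_lt_of_pos _ (by norm_num)
              have hA1 : aLine (pvEnc pre (acc, n)) i
                  = some (aUpd (pvEnc pre (acc, n)).1
                      ((pvEnc pre (acc, n)).2.1 * 16 + b64find c3 % 16)
                      ((pvEnc pre (acc, n)).2.2 + 4)) := by
                simp [aLine, hc1, hc2, hc3, pv_shl4, pv_band15]
              have hB1 : bLine (acc, n) i = some (acc * 16 + b64find c3 % 16, n + 4) := by
                simp [bLine, hc1, hc2, hc3, pv_band15]
              rw [hA1, hB1, pv_step4 pre acc n (b64find c3 % 16) hn hpar hv0 hv16]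
              exact ih (acc * 16 + b64find c3 % 16) (n + 4) (by omega) (by omega) (by omega)
          · have hv0 : 0 ≤ b64find c2 % 4 := Int.emod_nonneg _ (by norm_num)
            have hv4 : b64find c2 % 4 < 4 := Int.emod_lt_of_pos _ (by norm_num)
            have hA1 : aLine (pvEnc pre (acc, n)) i
                = some (aUpd (pvEnc pre (acc, n)).1
                    ((pvEnc pre (acc, n)).2.1 * 4 + b64find c2 % 4)
                    ((pvEnc pre (acc, n)).2.2 + 2)) := by
              simp [aLine, hc1, hc2, he2, pv_shl2, pv_band3]
            have hB1 : bLine (acc, n) i = some (acc * 4 + b64find c2 % 4, n + 2) := by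
              simp [bLine, hc1, hc2, he2, pv_band3]
            rw [hA1, hB1, pv_step2 pre acc n (b64find c2 % 4) hn hpar hv0 hv4]
            exact ih (acc * 4 + b64find c2 % 4) (n + 2) (by omega) (by omega) (by omega)
      · have hA1 : aLine (pvEnc pre (acc, n)) i = some (pvEnc pre (acc, n)) := by
          simp [aLine, hc1, he1]
        have hB1 : bLine (acc, n) i = some (acc, n) := by simp [bLine, hc1, he1]
        rw [hA1, hB1]
        exact ih acc n hacc hn hpar

-- under Pre_, B's packing loop never hits an IndexError, and keeps its state non-negative and even
lemma pv_bFold_some (lines : List String) :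
    ∀ (acc n : Int), Pre_base64_ste lines → 0 ≤ acc → 0 ≤ n → n % 2 = 0 →
    ∃ a' n', lines.foldl (fun o i => o.bind (fun s => bLine s i)) (some (acc, n)) = some (a', n')
      ∧ 0 ≤ a' ∧ 0 ≤ n' ∧ n' % 2 = 0 := by
  induction lines with
  | nil => intro acc n _ h0 h1 h2; exact ⟨acc, n, rfl, h0, h1, h2⟩
  | cons i ls ih =>
    intro acc n hpre hacc hn hpar
    have hi := hpre i (by simp)
    simp only [pysem] at hi
    rw [← PySem.List.pyGet?_neg_one] at hi
    have hpre' : Pre_base64_ste ls := fun j hj => hpre j (by simp [hj])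
    simp only [List.foldl, pv_some_bind]
    cases hc1 : PySem.List.pyGet? i.toList (-1) with
    | none => rw [hc1] at hi; simp at hi
    | some c1 =>
      by_cases he1 : c1 = '='
      · subst he1
        have h2 := hi.2 (by rw [hc1])
        cases hc2 : PySem.List.pyGet? i.toList (-2) with
        | none => rw [hc2] at h2; simp at h2
        | some c2 =>
          by_cases he2 : c2 = '='
          · subst he2
            have h3 := h2.2 (by rw [hc2])
            cases hc3 : PySem.List.pyGet? i.toList (-3) with
            | none => rw [hc3] at h3; simp at h3
            | some c3 =>
              have hB1 : bLine (acc, n) i = some (acc * 16 + b64find c3 % 16, n + 4) := by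
                simp [bLine, hc1, hc2, hc3, pv_band15]
              rw [hB1]
              have := Int.emod_nonneg (b64find c3) (show (16:Int) ≠ 0 by norm_num)
              exact ih _ _ hpre' (by omega) (by omega) (by omega)
          · have hB1 : bLine (acc, n) i = some (acc * 4 + b64find c2 % 4, n + 2) := by
              simp [bLine, hc1, hc2, he2, pv_band3]
            rw [hB1]
            have := Int.emod_nonneg (b64find c2) (show (4:Int) ≠ 0 by norm_num)
            exact ih _ _ hpre' (by omega) (by omega) (by omega)
      · have hB1 : bLine (acc, n) i = some (acc, n) := by simp [bLine, hc1, he1]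
        rw [hB1]
        exact ih acc n hpre' hacc hn hpar

-- ===== VERDICT (by name: the statement is the Claim_ definition above) =====
theorem base64_ste_spec : Claim_equal_base64_ste := by
  unfold Claim_equal_base64_ste
  intro lines _ hpre
  unfold Spec_base64_ste base64_ste base64_ste_alt
  obtain ⟨a', n', hB, ha, hn, hpar⟩ := pv_bFold_some lines 0 0 hpre le_rfl le_rfl rfl
  have hA := pv_main lines [] 0 0 le_rfl le_rfl rfl
  have h0 : pvEnc [] ((0 : Int), (0 : Int)) = (([] : List Char), (0 : Int), (0 : Int)) := by
    unfold pvEnc pvExt; norm_num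
  rw [h0, hB] at hA
  rw [hA, hB]
  simp only [Option.map_some]
  rw [PySem.Int.mod_eq_emod_of_pos (by norm_num),
    PySem.Int.floordiv_eq_ediv_of_pos (by norm_num),
    PySem.Int.floordiv_eq_ediv_of_pos (by norm_num)]
  rw [pv_foldl_ext]
  unfold pvEnc
  simp only [PySem.List.length_pyRange_one]
  norm_num
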